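-- pv_equiv track=rewrite | github.com/devforfu/codility | leader.py | right_leaders
-- ===== SOURCE A (Python) =====
-- def right_leaders(A, leader):
--     curr, same = 0, []
--     A = A[1:]
--     for length, x in enumerate(list(reversed(A)), 1):
--         if x == leader:
--             curr += 1
--         same.append(curr > (length // 2))
--     same.reverse()
--     return same
-- ===== SOURCE B (Python) =====
-- def right_leaders(A, leader):
--     tail = A[1:]
--     m = len(tail)
--     total = tail.count(leader)
--     out = []
--     prefix = 0
--     for j, x in enumerate(tail):
--         out.append(2 * (total - prefix) > m - j)
--         if x == leader:
--             prefix += 1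
--     return out
-- ===== Notes on version B (the rewrite author's own statement) =====
-- stated objective: simpler
-- what changed: B precomputes total = tail.count(leader) and scans the tail forward keeping a prefix counter, emitting 2*(suffix count) > suffix length directly, so the reversed enumeration, the floor division and the final list reversal all disappear.
import Mathlib
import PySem

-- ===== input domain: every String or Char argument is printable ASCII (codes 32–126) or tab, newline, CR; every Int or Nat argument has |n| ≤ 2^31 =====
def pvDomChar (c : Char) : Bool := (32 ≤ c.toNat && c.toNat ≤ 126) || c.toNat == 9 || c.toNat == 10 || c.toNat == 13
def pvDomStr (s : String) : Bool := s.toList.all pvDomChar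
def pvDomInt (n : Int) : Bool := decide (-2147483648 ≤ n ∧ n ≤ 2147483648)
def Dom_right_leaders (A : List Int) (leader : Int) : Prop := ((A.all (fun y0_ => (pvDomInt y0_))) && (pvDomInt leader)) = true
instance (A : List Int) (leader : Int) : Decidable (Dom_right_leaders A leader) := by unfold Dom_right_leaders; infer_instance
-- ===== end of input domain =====

-- B replaces A's reversed enumeration + floor-division test + final reversal by a single
-- forward scan comparing 2*(suffix leader count) with the suffix length (objective: simpler).

-- ===== PORT A =====
-- the loop 'for length, x in enumerate(list(reversed(A)), 1)' carrying curr and appending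
-- 'curr > length // 2'; structural recursion over the reversed tail with the same state
def rlLoopA (leader : Int) : List Int → Int → Int → List Bool
  | [], _, _ => []
  | x :: xs, curr, len =>
      decide ((if x == leader then curr + 1 else curr) > PySem.Int.floordiv len 2) ::
        rlLoopA leader xs (if x == leader then curr + 1 else curr) (len + 1)

def right_leaders (A : List Int) (leader : Int) : List Bool :=
  (rlLoopA leader (PySem.List.slice A (some 1) none).reverse 0 1).reverse

-- ===== PORT B =====
-- forward scan: j is the index, prefix the leaders seen so far
def rlLoopB (leader total m : Int) : List Int → Int → Int → List Bool
  | [], _, _ => []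
  | x :: xs, j, pfx =>
      decide (2 * (total - pfx) > m - j) ::
        rlLoopB leader total m xs (j + 1) (if x == leader then pfx + 1 else pfx)

def right_leaders_alt (A : List Int) (leader : Int) : List Bool :=
  let tail := PySem.List.slice A (some 1) none
  rlLoopB leader (PySem.List.count tail leader) tail.length tail 0 0

-- ===== PRECONDITION & SPEC =====
def Spec_right_leaders (A : List Int) (leader : Int) (out : List Bool) : Prop := out = right_leaders_alt A leader
instance (A : List Int) (leader : Int) (out : List Bool) : Decidable (Spec_right_leaders A leader out) := by unfold Spec_right_leaders; infer_instance

-- ===== CLAIM (what is proved, stated in full; the proofs are below) =====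
def Claim_equal_right_leaders : Prop := ∀ (A : List Int) (leader : Int), Dom_right_leaders A leader → Spec_right_leaders A leader (right_leaders A leader)

-- ===== LEMMAS AND PROOFS =====

-- common reference shape: head = (2 * leader count of the whole suffix > L), L = suffix length
def rlSpec (leader : Int) : List Int → Int → List Bool
  | [], _ => []
  | x :: xs, L => decide (2 * ((x :: xs).count leader : Int) > L) :: rlSpec leader xs (L - 1)

theorem rlLoopB_eq_spec (leader total m : Int) (s : List Int) (j p : Int)
    (h : total - p = (s.count leader : Int)) :
    rlLoopB leader total m s j p = rlSpec leader s (m - j) := by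
  induction s generalizing j p with
  | nil => simp [rlLoopB, rlSpec]
  | cons x xs ih =>
      have hp : total - (if x == leader then p + 1 else p) = (xs.count leader : Int) := by
        by_cases hx : x = leader <;> simp [hx] at h ⊢ <;> omega
      simp only [rlLoopB, rlSpec]
      rw [ih _ _ hp, show m - (j + 1) = m - j - 1 from by ring, ← h]

theorem rlLoopA_append (leader : Int) (rs : List Int) (x c len : Int) :
    rlLoopA leader (rs ++ [x]) c len =
      rlLoopA leader rs c len ++
        [decide ((c + (rs.count leader : Int) + (if x = leader then 1 else 0)) >
          PySem.Int.floordiv (len + rs.length) 2)] := by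
  induction rs generalizing c len with
  | nil => by_cases hx : x = leader <;> simp [rlLoopA, hx]
  | cons y ys ih =>
      have h1 : c + ((y :: ys).count leader : Int) + (if x = leader then 1 else 0)
          = (if y == leader then c + 1 else c) + (ys.count leader : Int)
              + (if x = leader then 1 else 0) := by
        by_cases hy : y = leader <;> (simp [hy]; try ring)
      have h2 : len + (((y :: ys).length : Nat) : Int) = len + 1 + ((ys.length : Nat) : Int) := by
        simp only [List.length_cons]; push_cast; ring
      simp only [List.cons_append, rlLoopA]
      rw [h1, h2, ih]

theorem half_lt (c L : Int) (_hL : 0 ≤ L) :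
    (c > PySem.Int.floordiv L 2) ↔ (2 * c > L) := by
  rw [PySem.Int.floordiv_eq_ediv_of_pos (by omega)]
  omega

theorem portA_eq_spec (leader : Int) (t : List Int) :
    (rlLoopA leader t.reverse 0 1).reverse = rlSpec leader t (t.length : Int) := by
  induction t with
  | nil => simp [rlLoopA, rlSpec]
  | cons x xs ih =>
      rw [List.reverse_cons, rlLoopA_append, List.reverse_append]
      simp only [List.reverse_singleton, List.singleton_append]
      have e1 : (0 : Int) + (xs.reverse.count leader : Int) + (if x = leader then 1 else 0)
          = ((x :: xs).count leader : Int) := by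
        by_cases hx : x = leader <;> (simp [hx]; try ring)
      have e2 : (1 : Int) + ((xs.reverse.length : Nat) : Int) = (((x :: xs).length : Nat) : Int) := by
        simp only [List.length_reverse, List.length_cons]; push_cast; ring
      rw [e1, e2, ih]
      show _ :: _ = rlSpec leader (x :: xs) _
      simp only [rlSpec]
      refine congrArg₂ _ ?_ ?_
      · simp only [decide_eq_decide]
        exact half_lt _ _ (by omega)
      · congr 1
        simp only [List.length_cons]
        push_cast
        ring

-- ===== VERDICT (by name: the statement is the Claim_ definition above) =====
theorem right_leaders_spec : Claim_equal_right_leaders := by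
  intro A leader _
  unfold Spec_right_leaders right_leaders right_leaders_alt
  rw [PySem.List.slice_from_one, portA_eq_spec, rlLoopB_eq_spec]
  · simp
  · simp [PySem.List.count_eq]
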